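-- pv_equiv track=rewrite | github.com/Joao-Victor-RVG/IF-Goiano-ED2 | Exercises/Video/video.py | avl_sort
-- ===== SOURCE A (Python) =====
-- class Node:
--     def __init__(self, key):
--         self.key = key
--         self.left = None
--         self.right = None
--         self.height = 1
--
-- def height(node):
--     if not node:
--         return 0
--     return node.height
--
-- def update_height(node):
--     if not node:
--         return 0
--     node.height = 1 + max(height(node.left), height(node.right))
--     return node.height
--
-- def balance_factor(node):
--     if not node:
--         return 0
--     return height(node.left) - height(node.right)
--
-- def left_rotate(y):
--     x = y.right
--     T2 = x.left
--
--     x.left = y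
--     y.right = T2
--
--     update_height(y)
--     update_height(x)
--
--     return x
--
-- def right_rotate(x):
--     y = x.left
--     T2 = y.right
--
--     y.right = x
--     x.left = T2
--
--     update_height(x)
--     update_height(y)
--
--     return y
--
-- def insert(root, key):
--     if not root:
--         return Node(key)
--
--     if key < root.key:
--         root.left = insert(root.left, key)
--     elif key > root.key:
--         root.right = insert(root.right, key)
--
--     update_height(root)
--
--     balance = balance_factor(root)
--
--     # Left Heavy
--     if balance > 1:
--         if root.left and key < root.left.key:
--             return right_rotate(root)
--         else:
--             if root.left:
--                 root.left = left_rotate(root.left)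
--             return right_rotate(root)
--
--     # Right Heavy
--     if balance < -1:
--         if root.right and key > root.right.key:
--             return left_rotate(root)
--         else:
--             if root.right:
--                 root.right = right_rotate(root.right)
--             return left_rotate(root)
--
--     return root
--
-- def inorder_traversal(root):
--     result = []
--     if root:
--         result += inorder_traversal(root.left)
--         result.append(root.key)
--         result += inorder_traversal(root.right)
--     return result
--
-- def avl_sort(data):
--     root = None
--     for num in data:
--         if isinstance(num, list):
--             for element in num:
--                 root = insert(root, element)
--         else:
--             root = insert(root, num)
--
--     return inorder_traversal(root)
-- ===== SOURCE B (Python) =====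
-- def avl_sort(data):
--     flat = []
--     for num in data:
--         if isinstance(num, list):
--             flat.extend(num)
--         else:
--             flat.append(num)
--     out = []
--     for x in sorted(flat):
--         if not out or out[-1] < x:
--             out.append(x)
--     return out
-- ===== Notes on version B (the rewrite author's own statement) =====
-- stated objective: faster
-- what changed: Replaces the AVL tree insert/rotate/inorder machinery with a single sorted() call followed by one linear dedup scan that keeps an element only when strictly greater than the last kept one.
import Mathlib
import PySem

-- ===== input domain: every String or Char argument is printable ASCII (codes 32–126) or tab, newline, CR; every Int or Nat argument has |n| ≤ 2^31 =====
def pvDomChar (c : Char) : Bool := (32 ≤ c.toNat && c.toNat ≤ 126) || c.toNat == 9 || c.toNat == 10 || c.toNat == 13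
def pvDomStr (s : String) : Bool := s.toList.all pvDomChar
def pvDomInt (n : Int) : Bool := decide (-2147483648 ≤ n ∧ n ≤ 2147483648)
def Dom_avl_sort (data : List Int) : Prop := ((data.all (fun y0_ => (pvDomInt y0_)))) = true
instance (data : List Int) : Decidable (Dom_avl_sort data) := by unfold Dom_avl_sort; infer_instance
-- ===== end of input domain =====

-- B replaces A's AVL-tree insert/rotate/inorder machinery with one sort plus a linear `<`-dedup scan (faster by constants, same result).
-- On List Int, A's `isinstance(num, list)` branch is dead, so both ports fold over the ints directly.

-- ===== PORT A =====
-- Python Node objects (key, left, right, height); not nested: children are AVL fields.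
inductive AVL where
  | nil : AVL
  | node : Int → AVL → AVL → Int → AVL
deriving DecidableEq, Repr

-- height(node)
def heightA : AVL → Int
  | .nil => 0
  | .node _ _ _ h => h

-- update_height(node): mutation ported as returning the node with recomputed height
def updH : AVL → AVL
  | .nil => .nil
  | .node k l r _ => .node k l r (1 + max (heightA l) (heightA r))

-- balance_factor(node)
def balF : AVL → Int
  | .nil => 0
  | .node _ l r _ => heightA l - heightA r

-- left_rotate(y); on a node with no right child Python raises AttributeError —
-- unreachable from avl_sort, the port returns the tree unchanged there
def leftRot : AVL → AVL
  | .node ky ly (.node kx lx rx _) hy =>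
      let y' := updH (.node ky ly lx hy)
      updH (.node kx y' rx 0)
  | t => t

-- right_rotate(x); same remark for a missing left child
def rightRot : AVL → AVL
  | .node kx (.node ky ly ry _) rx hx =>
      let x' := updH (.node kx ry rx hx)
      updH (.node ky ly x' 0)
  | t => t

-- `root.left and key < root.left.key` / `key > root.right.key`
def keyLtRoot (key : Int) : AVL → Bool
  | .nil => false
  | .node k _ _ _ => decide (key < k)

def keyGtRoot (key : Int) : AVL → Bool
  | .nil => false
  | .node k _ _ _ => decide (key > k)

-- root.left / root.right accessors and mutations used by the rebalancing code
def leftOf : AVL → AVL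
  | .nil => .nil
  | .node _ l _ _ => l

def rightOf : AVL → AVL
  | .nil => .nil
  | .node _ _ r _ => r

def setLeft : AVL → AVL → AVL
  | .nil, _ => .nil
  | .node k _ r h, x => .node k x r h

def setRight : AVL → AVL → AVL
  | .nil, _ => .nil
  | .node k l _ h, x => .node k l x h

-- insert(root, key); the `if root.left: root.left = left_rotate(root.left)` guard is covered
-- because leftRot/rightRot leave nil unchanged
def insertA : AVL → Int → AVL
  | .nil, key => .node key .nil .nil 1
  | .node k l r h, key =>
    let l1 := if key < k then insertA l key else l
    let r1 := if key > k then insertA r key else r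
    let root := updH (.node k l1 r1 h)
    let bal := balF root
    if bal > 1 then
      if keyLtRoot key (leftOf root) then rightRot root
      else rightRot (setLeft root (leftRot (leftOf root)))
    else if bal < -1 then
      if keyGtRoot key (rightOf root) then leftRot root
      else leftRot (setRight root (rightRot (rightOf root)))
    else root

-- inorder_traversal(root)
def inorderA : AVL → List Int
  | .nil => []
  | .node k l r _ => inorderA l ++ k :: inorderA r

def avl_sort (data : List Int) : List Int :=
  inorderA (data.foldl (fun root num => insertA root num) .nil)

-- ===== PORT B =====
-- one step of B's dedup scan: `if not out or out[-1] < x: out.append(x)`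
def dedupStep (out : List Int) (x : Int) : List Int :=
  match out.getLast? with
  | none => out ++ [x]
  | some l => if l < x then out ++ [x] else out

-- the flatten loop of Source B is the identity on List Int (no element is a list)
def avl_sort_alt (data : List Int) : List Int :=
  (PySem.List.sorted data (fun v => v) false).foldl dedupStep []

-- ===== PRECONDITION & SPEC =====
def Spec_avl_sort (data : List Int) (out : List Int) : Prop := out = avl_sort_alt data
instance (data : List Int) (out : List Int) : Decidable (Spec_avl_sort data out) := by unfold Spec_avl_sort; infer_instance

-- ===== CLAIM (what is proved, stated in full; the proofs are below) =====
def Claim_equal_avl_sort : Prop := ∀ (data : List Int), Dom_avl_sort data → Spec_avl_sort data (avl_sort data)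

-- ===== LEMMAS AND PROOFS =====

-- sorted insert skipping duplicates: characterises what one AVL insert does to the inorder list
def linsert (k : Int) : List Int → List Int
  | [] => [k]
  | x :: xs => if k < x then k :: x :: xs else if x < k then x :: linsert k xs else x :: xs

theorem mem_linsert (k a : Int) (l : List Int) : a ∈ linsert k l ↔ a = k ∨ a ∈ l := by
  induction l with
  | nil => simp [linsert]
  | cons x xs ih =>
    simp only [linsert]
    split_ifs with h1 h2
    · simp only [List.mem_cons]
    · simp only [List.mem_cons, ih]; tauto
    · have hxk : x = k := le_antisymm (not_lt.1 h1) (not_lt.1 h2)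
      subst hxk; simp only [List.mem_cons]; tauto

theorem sorted_linsert (k : Int) (l : List Int) (h : l.Pairwise (· < ·)) :
    (linsert k l).Pairwise (· < ·) := by
  induction l with
  | nil => simp [linsert]
  | cons x xs ih =>
    rcases List.pairwise_cons.1 h with ⟨hx, hxs⟩
    simp only [linsert]
    split_ifs with h1 h2
    · refine List.pairwise_cons.2 ⟨?_, h⟩
      intro b hb
      rcases List.mem_cons.1 hb with rfl | hb
      · exact h1
      · exact h1.trans (hx b hb)
    · refine List.pairwise_cons.2 ⟨?_, ih hxs⟩
      intro b hb
      rcases (mem_linsert k b xs).1 hb with rfl | hb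
      · exact h2
      · exact hx b hb
    · exact h

theorem linsert_append_lt (k c : Int) (L R : List Int) (h : k < c) :
    linsert k (L ++ c :: R) = linsert k L ++ c :: R := by
  induction L with
  | nil => simp [linsert, h]
  | cons x xs ih =>
    simp only [List.cons_append, linsert]
    split_ifs with h1 h2 <;> simp [ih]

theorem linsert_append_gt (k c : Int) (L R : List Int) (h : c < k)
    (hL : ∀ a ∈ L, a < k) :
    linsert k (L ++ c :: R) = L ++ c :: linsert k R := by
  induction L with
  | nil => simp [linsert, h, not_lt.2 h.le]
  | cons x xs ih =>
    have hx : x < k := hL x (by simp)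
    simp only [List.cons_append, linsert]
    rw [if_neg (not_lt.2 hx.le), if_pos hx, ih (fun a ha => hL a (by simp [ha]))]

theorem linsert_append_eq (k : Int) (L R : List Int) (hL : ∀ a ∈ L, a < k) :
    linsert k (L ++ k :: R) = L ++ k :: R := by
  induction L with
  | nil => simp [linsert]
  | cons x xs ih =>
    have hx : x < k := hL x (by simp)
    simp only [List.cons_append, linsert]
    rw [if_neg (not_lt.2 hx.le), if_pos hx, ih (fun a ha => hL a (by simp [ha]))]

@[simp] theorem inorder_updH (t : AVL) : inorderA (updH t) = inorderA t := by
  cases t <;> simp [updH, inorderA]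

@[simp] theorem inorder_leftRot (t : AVL) : inorderA (leftRot t) = inorderA t := by
  cases t with
  | nil => rfl
  | node k l r h => cases r <;> simp [leftRot, inorderA]

@[simp] theorem inorder_rightRot (t : AVL) : inorderA (rightRot t) = inorderA t := by
  cases t with
  | nil => rfl
  | node k l r h => cases l <;> simp [rightRot, inorderA]

-- the whole rebalancing block of insert preserves the inorder list
theorem inorder_insertA (t : AVL) (key : Int)
    (hs : (inorderA t).Pairwise (· < ·)) :
    inorderA (insertA t key) = linsert key (inorderA t) := by
  induction t with
  | nil => simp [insertA, inorderA, linsert]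
  | node k l r h ihl ihr =>
    obtain ⟨hsl, hskr, hbetween⟩ :=
      List.pairwise_append.1 (by simpa [inorderA] using hs)
    have hsr : (inorderA r).Pairwise (· < ·) := (List.pairwise_cons.1 hskr).2
    have hlk : ∀ a ∈ inorderA l, a < k := fun a ha => hbetween a ha k (by simp)
    rcases lt_trichotomy key k with hlt | heq | hgt
    · have hngt : ¬ key > k := by omega
      simp only [insertA, if_pos hlt, if_neg hngt, inorderA]
      have hrec : inorderA (insertA l key) = linsert key (inorderA l) := ihl hsl
      rw [linsert_append_lt key k _ _ hlt]
      split_ifs <;>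
        simp [inorderA, hrec, updH, setLeft, setRight, leftOf, rightOf]
    · have h1 : ¬ key < k := by omega
      have h2 : ¬ key > k := by omega
      simp only [insertA, if_neg h1, if_neg h2, inorderA]
      rw [show linsert key (inorderA l ++ k :: inorderA r) = inorderA l ++ k :: inorderA r from by
        subst heq; exact linsert_append_eq key (inorderA l) (inorderA r) hlk]
      split_ifs <;>
        simp [inorderA, updH, setLeft, setRight, leftOf, rightOf]
    · have hnlt : ¬ key < k := by omega
      simp only [insertA, if_neg hnlt, if_pos hgt, inorderA]
      have hrec : inorderA (insertA r key) = linsert key (inorderA r) := ihr hsr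
      have hlk' : ∀ a ∈ inorderA l, a < key := fun a ha => (hlk a ha).trans hgt
      rw [linsert_append_gt key k (inorderA l) (inorderA r) hgt hlk']
      split_ifs <;>
        simp [inorderA, hrec, updH, setLeft, setRight, leftOf, rightOf]

theorem sorted_mem_foldl_insertA (data : List Int) (t : AVL)
    (hs : (inorderA t).Pairwise (· < ·)) :
    (inorderA (data.foldl (fun root num => insertA root num) t)).Pairwise (· < ·) ∧
    (∀ a, a ∈ inorderA (data.foldl (fun root num => insertA root num) t) ↔
      a ∈ inorderA t ∨ a ∈ data) := by
  induction data generalizing t with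
  | nil => simp [hs]
  | cons x xs ih =>
    have h1 : inorderA (insertA t x) = linsert x (inorderA t) := inorder_insertA t x hs
    have h2 : (inorderA (insertA t x)).Pairwise (· < ·) := by
      rw [h1]; exact sorted_linsert x _ hs
    obtain ⟨hsort, hmem⟩ := ih (insertA t x) h2
    refine ⟨by simpa using hsort, fun a => ?_⟩
    simp only [List.foldl_cons]
    rw [hmem a, h1, mem_linsert]
    simp; tauto

-- B-side: the fold with dedupStep equals a structural destutter
def ddFrom (p : Int) : List Int → List Int
  | [] => []
  | x :: xs => if p < x then x :: ddFrom x xs else ddFrom p xs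

def dd : List Int → List Int
  | [] => []
  | x :: xs => x :: ddFrom x xs

theorem foldl_dedupStep_from (s acc : List Int) (p : Int)
    (hlast : acc.getLast? = some p) :
    s.foldl dedupStep acc = acc ++ ddFrom p s := by
  induction s generalizing acc p with
  | nil => simp [ddFrom]
  | cons x xs ih =>
    simp only [List.foldl_cons, dedupStep, hlast, ddFrom]
    split_ifs with h
    · rw [ih (acc ++ [x]) x (by simp)]; simp
    · rw [ih acc p hlast]

theorem foldl_dedupStep_nil (s : List Int) :
    s.foldl dedupStep [] = dd s := by
  cases s with
  | nil => rfl
  | cons x xs =>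
    simp only [List.foldl_cons, dedupStep, List.getLast?_nil, dd, List.nil_append]
    rw [foldl_dedupStep_from xs [x] x (by simp)]; simp

theorem ddFrom_sorted_mem (p : Int) (s : List Int) (hs : s.Pairwise (· ≤ ·)) :
    (ddFrom p s).Pairwise (· < ·) ∧ (∀ b ∈ ddFrom p s, p < b) ∧
    (∀ b, b ∈ ddFrom p s ↔ b ∈ s ∧ p < b) := by
  induction s generalizing p with
  | nil => simp [ddFrom]
  | cons x xs ih =>
    rcases List.pairwise_cons.1 hs with ⟨hx, hxs⟩
    simp only [ddFrom]
    split_ifs with h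
    · obtain ⟨hsort, hgt, hmem⟩ := ih x hxs
      refine ⟨List.pairwise_cons.2 ⟨hgt, hsort⟩, ?_, ?_⟩
      · intro b hb
        rcases List.mem_cons.1 hb with rfl | hb
        · exact h
        · exact h.trans (hgt b hb)
      · intro b
        simp only [List.mem_cons, hmem]
        constructor
        · rintro (rfl | ⟨hb, hxb⟩)
          · exact ⟨Or.inl rfl, h⟩
          · exact ⟨Or.inr hb, h.trans hxb⟩
        · rintro ⟨rfl | hb, hpb⟩
          · exact Or.inl rfl
          · rcases lt_or_eq_of_le (hx b hb) with hlt | heq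
            · exact Or.inr ⟨hb, hlt⟩
            · exact Or.inl heq.symm
    · obtain ⟨hsort, hgt, hmem⟩ := ih p hxs
      refine ⟨hsort, hgt, fun b => ?_⟩
      rw [hmem]
      simp only [List.mem_cons]
      constructor
      · rintro ⟨hb, hpb⟩; exact ⟨Or.inr hb, hpb⟩
      · rintro ⟨rfl | hb, hpb⟩
        · exact absurd hpb h
        · exact ⟨hb, hpb⟩

theorem dd_sorted_mem (s : List Int) (hs : s.Pairwise (· ≤ ·)) :
    (dd s).Pairwise (· < ·) ∧ (∀ b, b ∈ dd s ↔ b ∈ s) := by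
  cases s with
  | nil => simp [dd]
  | cons x xs =>
    rcases List.pairwise_cons.1 hs with ⟨hx, hxs⟩
    obtain ⟨hsort, hgt, hmem⟩ := ddFrom_sorted_mem x xs hxs
    refine ⟨List.pairwise_cons.2 ⟨hgt, hsort⟩, fun b => ?_⟩
    simp only [dd, List.mem_cons, hmem]
    constructor
    · rintro (rfl | ⟨hb, _⟩)
      · exact Or.inl rfl
      · exact Or.inr hb
    · rintro (rfl | hb)
      · exact Or.inl rfl
      · rcases lt_or_eq_of_le (hx b hb) with hlt | heq
        · exact Or.inr ⟨hb, hlt⟩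
        · exact Or.inl heq.symm

-- two strictly sorted lists with the same members are equal
theorem eq_of_sorted_lt_of_mem_iff (l1 l2 : List Int)
    (h1 : l1.Pairwise (· < ·)) (h2 : l2.Pairwise (· < ·))
    (hm : ∀ a, a ∈ l1 ↔ a ∈ l2) : l1 = l2 := by
  induction l1 generalizing l2 with
  | nil =>
    cases l2 with
    | nil => rfl
    | cons y ys => exact absurd ((hm y).2 (by simp)) (by simp)
  | cons x xs ih =>
    cases l2 with
    | nil => exact absurd ((hm x).1 (by simp)) (by simp)
    | cons y ys =>
      rcases List.pairwise_cons.1 h1 with ⟨hx, hxs⟩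
      rcases List.pairwise_cons.1 h2 with ⟨hy, hys⟩
      have hxy : x = y := by
        rcases List.mem_cons.1 ((hm x).1 (by simp)) with rfl | hxin
        · rfl
        · rcases List.mem_cons.1 ((hm y).2 (by simp)) with rfl | hyin
          · rfl
          · exact absurd (hx y hyin) (not_lt.2 (hy x hxin).le)
      subst hxy
      refine congrArg (x :: ·) (ih ys hxs hys fun a => ?_)
      constructor
      · intro ha
        rcases List.mem_cons.1 ((hm a).1 (List.mem_cons_of_mem x ha)) with rfl | h
        · exact absurd (hx a ha) (lt_irrefl a)
        · exact h
      · intro ha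
        rcases List.mem_cons.1 ((hm a).2 (List.mem_cons_of_mem x ha)) with rfl | h
        · exact absurd (hy a ha) (lt_irrefl a)
        · exact h

-- ===== VERDICT (by name: the statement is the Claim_ definition above) =====
theorem avl_sort_spec : Claim_equal_avl_sort := by
  intro data _
  unfold Spec_avl_sort avl_sort avl_sort_alt
  obtain ⟨hAs, hAm⟩ := sorted_mem_foldl_insertA data .nil (by simp [inorderA])
  have hpw : (PySem.List.sorted data (fun v => v) false).Pairwise (· ≤ ·) := by
    simpa using PySem.List.sorted_pairwise (xs := data) (key := fun v => v)
  obtain ⟨hBs, hBm⟩ := dd_sorted_mem _ hpw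
  rw [foldl_dedupStep_nil]
  refine eq_of_sorted_lt_of_mem_iff _ _ hAs hBs (fun a => ?_)
  rw [hAm a, hBm a, PySem.List.mem_sorted]
  simp [inorderA]
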